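-- pv_equiv track=rewrite | github.com/divanedu/cf_v4 | insights.py | _month_iter
-- ===== SOURCE A (Python) =====
-- from typing import Dict, Iterable, List, Optional, Sequence, Tuple
--
-- def _month_iter(y0: int, m0: int, y1: int, m1: int) -> List[Tuple[int, int]]:
--     out: List[Tuple[int, int]] = []
--     y, m = y0, m0
--     while (y < y1) or (y == y1 and m <= m1):
--         out.append((y, m))
--         m += 1
--         if m == 13:
--             m = 1
--             y += 1
--     return out
-- ===== SOURCE B (Python) =====
-- from typing import List, Tuple
--
-- def _month_iter(y0: int, m0: int, y1: int, m1: int) -> List[Tuple[int, int]]: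
--     start = y0 * 12 + (m0 - 1)
--     end = y1 * 12 + (m1 - 1)
--     return [(i // 12, i % 12 + 1) for i in range(start, end + 1)]
-- ===== Notes on version B (the rewrite author's own statement) =====
-- stated objective: idiomatic
-- what changed: Replaces the stateful carry loop over (year, month) with a flat absolute-month index range and a divmod index-to-(year,month) mapping written as a list comprehension; Pre_ excludes out-of-range month arguments (m0 or m1 outside 1..12), on which A's non-normalizing carry either diverges or returns un-normalized months that no arithmetic normalization matches.
-- outside the precondition, e.g. on _month_iter(0, 13, 0, 14): A returns [(0, 13), (0, 14)], B returns [(1, 1), (1, 2)]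
import Mathlib
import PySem

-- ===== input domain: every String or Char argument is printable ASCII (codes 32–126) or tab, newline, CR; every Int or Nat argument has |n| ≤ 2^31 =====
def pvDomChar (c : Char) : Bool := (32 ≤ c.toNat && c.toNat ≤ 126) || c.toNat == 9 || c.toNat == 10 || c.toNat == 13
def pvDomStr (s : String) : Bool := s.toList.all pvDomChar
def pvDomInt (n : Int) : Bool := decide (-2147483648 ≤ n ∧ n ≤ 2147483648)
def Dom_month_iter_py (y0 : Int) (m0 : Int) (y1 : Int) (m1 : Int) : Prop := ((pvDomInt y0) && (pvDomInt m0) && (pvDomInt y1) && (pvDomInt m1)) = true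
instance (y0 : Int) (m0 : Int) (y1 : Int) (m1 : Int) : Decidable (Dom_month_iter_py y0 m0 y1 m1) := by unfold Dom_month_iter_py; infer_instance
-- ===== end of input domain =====

-- B replaces A's stateful carry loop with an absolute-month-index range mapped through divmod (idiomatic; same cost).

-- ===== PORT A =====
-- A's while loop, as a fuel recursion; the fuel is a bound on the iteration count, exact inside Pre_
def monthLoopA : Nat → Int → Int → Int → Int → List (Int × Int)
  | 0, _, _, _, _ => []
  | Nat.succ f, y, m, y1, m1 =>
    if y < y1 ∨ (y = y1 ∧ m ≤ m1) then
      (y, m) :: (if m + 1 = 13 then monthLoopA f (y + 1) 1 y1 m1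
                 else monthLoopA f y (m + 1) y1 m1)
    else []

def month_iter_py (y0 : Int) (m0 : Int) (y1 : Int) (m1 : Int) : List (Int × Int) :=
  monthLoopA ((y1 * 12 + max m1 12 - (y0 * 12 + m0) + 2).toNat) y0 m0 y1 m1

-- ===== PORT B =====
def month_iter_py_alt (y0 : Int) (m0 : Int) (y1 : Int) (m1 : Int) : List (Int × Int) :=
  (PySem.List.pyRange (y0 * 12 + (m0 - 1)) (y1 * 12 + (m1 - 1) + 1) 1).map
    (fun i => (PySem.Int.floordiv i 12, PySem.Int.mod i 12 + 1))

-- ===== PRECONDITION & SPEC =====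
-- Pre_ excludes out-of-range month arguments (m0 or m1 outside 1..12): there A's non-normalizing
-- carry either never terminates (e.g. m0 = 13 with y0 < y1) or returns un-normalized month values
-- (e.g. (0,13) itself, or a 13th month of y1 when m1 = 13) that B's divmod normalization is not meant to match.
def Pre_month_iter_py (y0 : Int) (m0 : Int) (y1 : Int) (m1 : Int) : Prop :=
  (1 ≤ m0 ∧ m0 ≤ 12 ∧ 1 ≤ m1 ∧ m1 ≤ 12) ∨
  ((y1 < y0 ∨ (y1 = y0 ∧ m1 < m0)) ∧ y1 * 12 + m1 < y0 * 12 + m0)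
instance (y0 : Int) (m0 : Int) (y1 : Int) (m1 : Int) : Decidable (Pre_month_iter_py y0 m0 y1 m1) := by unfold Pre_month_iter_py; infer_instance
def pvWitness_month_iter_py : Int × Int × Int × Int := (2023, 11, 2024, 2)

def Spec_month_iter_py (y0 : Int) (m0 : Int) (y1 : Int) (m1 : Int) (out : List (Int × Int)) : Prop := out = month_iter_py_alt y0 m0 y1 m1
instance (y0 : Int) (m0 : Int) (y1 : Int) (m1 : Int) (out : List (Int × Int)) : Decidable (Spec_month_iter_py y0 m0 y1 m1 out) := by unfold Spec_month_iter_py; infer_instance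

-- ===== CLAIM (what is proved, stated in full; the proofs are below) =====
def Claim_equal_month_iter_py : Prop := ∀ (y0 : Int) (m0 : Int) (y1 : Int) (m1 : Int), Dom_month_iter_py y0 m0 y1 m1 → Pre_month_iter_py y0 m0 y1 m1 → Spec_month_iter_py y0 m0 y1 m1 (month_iter_py y0 m0 y1 m1)

-- ===== LEMMAS AND PROOFS =====

-- divmod of an in-range absolute month index
theorem divmod_month (y m : Int) (h1 : 1 ≤ m) (h2 : m ≤ 12) :
    PySem.Int.floordiv (y * 12 + (m - 1)) 12 = y ∧ PySem.Int.mod (y * 12 + (m - 1)) 12 = m - 1 := by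
  rw [PySem.Int.floordiv_eq_ediv_of_pos (by omega), PySem.Int.mod_eq_emod_of_pos (by omega)]
  omega

-- Loop invariant: with a valid current month and enough fuel, A's loop produces B's mapped range.
theorem monthLoopA_eq (y1 m1 : Int) (hm1a : 1 ≤ m1) (hm1b : m1 ≤ 12) :
    ∀ (f : Nat) (y m : Int), 1 ≤ m → m ≤ 12 →
      y1 * 12 + (m1 - 1) + 1 - (y * 12 + (m - 1)) ≤ (f : Int) →
      monthLoopA f y m y1 m1 =
        (PySem.List.pyRange (y * 12 + (m - 1)) (y1 * 12 + (m1 - 1) + 1) 1).map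
          (fun i => (PySem.Int.floordiv i 12, PySem.Int.mod i 12 + 1)) := by
  intro f
  induction f with
  | zero =>
    intro y m hma hmb hf
    rw [monthLoopA, PySem.List.pyRange_one_eq_nil (by simpa using by omega)]
    simp
  | succ f ih =>
    intro y m hma hmb hf
    rw [monthLoopA]
    by_cases hc : y < y1 ∨ (y = y1 ∧ m ≤ m1)
    · have hlt : y * 12 + (m - 1) < y1 * 12 + (m1 - 1) + 1 := by omega
      rw [if_pos hc, PySem.List.pyRange_one_cons hlt, List.map_cons]
      obtain ⟨hd, hm⟩ := divmod_month y m hma hmb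
      rw [hd, hm]
      rw [sub_add_cancel]
      by_cases h13 : m + 1 = 13
      · rw [if_pos h13, ih (y + 1) 1 (by omega) (by omega) (by push_cast; omega)]
        have : (y + 1) * 12 + (1 - 1) = y * 12 + (m - 1) + 1 := by omega
        rw [this]
      · rw [if_neg h13, ih y (m + 1) (by omega) (by omega) (by omega)]
        have : y * 12 + (m + 1 - 1) = y * 12 + (m - 1) + 1 := by omega
        rw [this]
    · rw [if_neg hc, PySem.List.pyRange_one_eq_nil (by omega)]
      simp

-- when the loop condition is false at entry, A's loop is empty for any fuel
theorem monthLoopA_nil (f : Nat) (y m y1 m1 : Int) (h : ¬ (y < y1 ∨ (y = y1 ∧ m ≤ m1))) :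
    monthLoopA f y m y1 m1 = [] := by
  cases f with
  | zero => rfl
  | succ f => rw [monthLoopA, if_neg h]

-- ===== VERDICT (by name: the statement is the Claim_ definition above) =====
theorem month_iter_py_spec : Claim_equal_month_iter_py := by
  intro y0 m0 y1 m1 _ hpre
  unfold Spec_month_iter_py month_iter_py month_iter_py_alt
  rcases hpre with ⟨h1, h2, h3, h4⟩ | ⟨hord, hidx⟩
  · exact monthLoopA_eq y1 m1 h3 h4 _ y0 m0 h1 h2 (by omega)
  · rw [monthLoopA_nil _ _ _ _ _ (by omega), PySem.List.pyRange_one_eq_nil (by omega)]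
    simp
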